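-- pv_equiv track=rewrite | github.com/pederao/palindrome | palindrome.py | lookup_table_
-- ===== SOURCE A (Python) =====
-- import itertools
-- from typing import List, Tuple, Iterator
--
-- def lookup_table_(n: int, weight: List[int], l: int) -> List[Tuple[int]]:
--     """
--     Private helper function for pal_div_iterator_.  The idea is to
--     create a reverse lookup table that maps integer with the same or
--     fewer digits than n to the remainder of the integer when divided by n.
--     """
--     assert(len(weight)==l)
--     table = []
--     for i in range(n):
--         table.append([])
--     for tail in itertools.product(range(10), repeat=l):
--         v = sum([w*d for (w,d) in zip(weight, tail)]) % n
--         index = (n-v)%n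
--         table[index].append(tail)
--     return(table)
-- ===== SOURCE B (Python) =====
-- def lookup_table_(n, weight, l):
--     assert len(weight) == l
--     table = [[] for _ in range(n)]
--
--     def go(ws, prefix, rem):
--         if not ws:
--             table[(n - rem % n) % n].append(prefix)
--         else:
--             for d in range(10):
--                 go(ws[1:], prefix + (d,), rem + ws[0] * d)
--
--     go(list(weight), (), 0)
--     return table
-- ===== Notes on version B (the rewrite author's own statement) =====
-- stated objective: alternative
-- what changed: Replaces the flat itertools.product loop (which re-zips weight with every full tuple and re-sums the dot product from scratch) by a recursive descent over the digit positions that threads the partial weighted sum as an accumulator, taking the bucket index at the leaf.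
import Mathlib
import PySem

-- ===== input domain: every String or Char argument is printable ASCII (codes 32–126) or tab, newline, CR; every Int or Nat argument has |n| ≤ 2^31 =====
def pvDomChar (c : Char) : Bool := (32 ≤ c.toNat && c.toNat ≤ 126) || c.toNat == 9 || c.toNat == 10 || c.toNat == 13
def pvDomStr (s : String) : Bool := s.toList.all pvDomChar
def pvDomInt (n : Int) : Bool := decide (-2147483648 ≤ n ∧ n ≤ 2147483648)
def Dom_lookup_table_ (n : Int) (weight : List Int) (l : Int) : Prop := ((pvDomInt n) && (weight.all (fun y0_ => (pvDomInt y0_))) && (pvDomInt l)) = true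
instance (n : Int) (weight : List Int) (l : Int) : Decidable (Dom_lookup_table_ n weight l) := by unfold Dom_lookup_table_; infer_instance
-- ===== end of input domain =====

-- B replaces A's flat itertools.product loop by a recursive descent over digit positions
-- threading the partial weighted sum (objective: alternative decomposition, same cost).


-- ===== PORT A =====
-- itertools.product(range(10), repeat=l), in lexicographic order (last digit fastest)
def pvAllTails (l : Nat) : List (List Int) :=
  match l with
  | 0 => [[]]
  | k + 1 => (List.range 10).flatMap (fun d => (pvAllTails k).map (fun t => (d : Int) :: t))

def lookup_table_ (n : Int) (weight : List Int) (l : Int) : List (List (List Int)) :=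
  let table : List (List (List Int)) :=
    (PySem.List.pyRange 0 n 1).foldl (fun t _ => t ++ [[]]) []
  (pvAllTails l.toNat).foldl
    (fun t tail =>
      let v := PySem.Int.mod (((weight.zip tail).map (fun p => p.1 * p.2)).sum) n
      let index := PySem.Int.mod (n - v) n
      t.modify index.toNat (fun b => b ++ [tail]))
    table

-- ===== PORT B =====
-- the inner recursion go(ws, prefix, rem) of Source B
def pvGo (n : Int) (ws : List Int) (pre : List Int) (rem : Int)
    (table : List (List (List Int))) : List (List (List Int)) :=
  match ws with
  | [] => table.modify (PySem.Int.mod (n - PySem.Int.mod rem n) n).toNat (fun b => b ++ [pre])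
  | w :: rest =>
      (List.range 10).foldl (fun t d => pvGo n rest (pre ++ [(d : Int)]) (rem + w * (d : Int)) t) table

def lookup_table__alt (n : Int) (weight : List Int) (l : Int) : List (List (List Int)) :=
  pvGo n weight [] 0 (List.replicate n.toNat [])

-- ===== PRECONDITION & SPEC =====
-- Pre_ excludes exactly the inputs on which A raises: len(weight) != l (AssertionError),
-- n = 0 (ZeroDivisionError in '% n'), n < 0 (IndexError: table is empty but a tuple is indexed).
def Pre_lookup_table_ (n : Int) (weight : List Int) (l : Int) : Prop :=
  (weight.length : Int) = l ∧ 1 ≤ n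
instance (n : Int) (weight : List Int) (l : Int) : Decidable (Pre_lookup_table_ n weight l) := by unfold Pre_lookup_table_; infer_instance
def pvWitness_lookup_table_ : Int × List Int × Int := (3, [10, 1], 2)

def Spec_lookup_table_ (n : Int) (weight : List Int) (l : Int) (out : List (List (List Int))) : Prop := out = lookup_table__alt n weight l
instance (n : Int) (weight : List Int) (l : Int) (out : List (List (List Int))) : Decidable (Spec_lookup_table_ n weight l out) := by unfold Spec_lookup_table_; infer_instance

-- ===== CLAIM (what is proved, stated in full; the proofs are below) =====
def Claim_equal_lookup_table_ : Prop := ∀ (n : Int) (weight : List Int) (l : Int), Dom_lookup_table_ n weight l → Pre_lookup_table_ n weight l → Spec_lookup_table_ n weight l (lookup_table_ n weight l)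

-- ===== LEMMAS AND PROOFS =====

-- A's bucket-initialisation loop builds n empty buckets
theorem pv_table_init (xs : List Int) (init : List (List (List Int))) :
    xs.foldl (fun t _ => t ++ [[]]) init = init ++ List.replicate xs.length [] := by
  induction xs generalizing init with
  | nil => simp
  | cons x t ih => simp [List.foldl_cons, ih, List.replicate_succ]

-- core: pvGo enumerates exactly the tails of pvAllTails, accumulating the dot product
theorem pv_go_eq (n : Int) (ws pre : List Int) (rem : Int) (table : List (List (List Int))) :
    pvGo n ws pre rem table =
      (pvAllTails ws.length).foldl
        (fun t tail =>
          t.modify (PySem.Int.mod (n - PySem.Int.mod (rem + ((ws.zip tail).map (fun p => p.1 * p.2)).sum) n) n).toNat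
            (fun b => b ++ [pre ++ tail]))
        table := by
  induction ws generalizing pre rem table with
  | nil => simp [pvGo, pvAllTails]
  | cons w rest ih =>
      rw [pvGo, List.length_cons, pvAllTails, List.foldl_flatMap]
      apply PySem.List.foldl_congr_mem
      intro t d _
      rw [List.foldl_map, ih]
      apply PySem.List.foldl_congr_mem
      intro t' tail _
      simp [List.append_assoc, add_assoc]

theorem lookup_table__spec' (n : Int) (weight : List Int) (l : Int)
    (hpre : Pre_lookup_table_ n weight l) :
    lookup_table_ n weight l = lookup_table__alt n weight l := by
  obtain ⟨hl, hn⟩ := hpre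
  have hlen : l.toNat = weight.length := by omega
  unfold lookup_table_ lookup_table__alt
  rw [pv_go_eq, hlen, pv_table_init, PySem.List.length_pyRange_one]
  simp

-- ===== VERDICT (by name: the statement is the Claim_ definition above) =====
theorem lookup_table__spec : Claim_equal_lookup_table_ := by
  intro n weight l _ hpre
  exact lookup_table__spec' n weight l hpre
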